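-- pv_equiv track=rewrite | github.com/rimu-stack/fa-prog-practice | tasks/task_2.py | transformation
-- ===== SOURCE A (Python) =====
-- def transformation(answer: int) -> str:
--     answer_append = []
--     dic = {
--         'ноль': '0',
--         'один': '1',
--         'два': '2',
--         'три': '3',
--         'четыре': '4',
--         'пять': '5',
--         'шесть': '6',
--         'семь': '7',
--         'восемь': '8',
--         'девять': '9',
--         'десять': '10',
--         'одиннадцать': '11',
--         'двенадцать': '12',
--         'тринадцать': '13',
--         'четырнадцать': '14',
--         'пятнадцать': '15',
--         'шестнадцать': '16',
--         'семнадцать': '17',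
--         'восемнадцать': '18',
--         'девятнадцать': '19',
--         'двадцать': '20',
--         'тридцать': '30',
--         'сорок': '40',
--         'пятьдесят': '50',
--         'шестьдесят': '60',
--         'семьдесят': '70',
--         'восемьдесят': '80',
--         'девяносто': '90',
--         'минус': '-',
--     }
--
--     dic = {v:k for k, v in dic.items()}
--
--     if answer < -100:
--         return 'Меньше минус ста'
--     if answer > 100:
--         return 'Больше ста'
--
--     if answer > 19:
--         y = answer//10*10
--         answer_append.append(dic[str(y)])
--
--         if answer % 10 == 0:
--             return ' '.join(answer_append)
--
--
--         if answer % 10 != 0: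
--             z = answer % 10
--             answer_append.append(dic[str(z)])
--             return ' '.join(answer_append)
--
--     if answer < 20 and answer > 0:
--
--         answer_append.append(dic[str(answer)])
--         return ' '.join(answer_append)
--
--     if answer == 0:
--         return 'ноль'
--
--     if answer < 0:
--         answer = -answer
--         answer_append.append('минус')
--
--         if answer > 19:
--             y = answer//10*10
--             answer_append.append(dic[str(y)])
--
--             if answer % 10 == 0:
--                 return ' '.join(answer_append)
--
--
--         if answer % 10 != 0:
--             z = answer % 10
--             answer_append.append(dic[str(z)])
--             return ' '.join(answer_append)
--
--         if answer < 20: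
--             answer_append.append(dic[str(answer)])
--             return ' '.join(answer_append)
-- ===== SOURCE B (Python) =====
-- # Table-driven: precompute the Russian word strings for 0..99 once; the function keeps only the
-- # boundary guards, a sign prefix and one list lookup.
-- # Intended difference from A: for -19..-11 this returns the correct teen word ("минус одиннадцать"),
-- # where A returns "минус" + the units word.
--
-- UNITS = ['ноль', 'один', 'два', 'три', 'четыре', 'пять', 'шесть', 'семь',
--          'восемь', 'девять', 'десять', 'одиннадцать', 'двенадцать',
--          'тринадцать', 'четырнадцать', 'пятнадцать', 'шестнадцать',
--          'семнадцать', 'восемнадцать', 'девятнадцать']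
-- TENS = ['двадцать', 'тридцать', 'сорок', 'пятьдесят', 'шестьдесят',
--         'семьдесят', 'восемьдесят', 'девяносто']
--
--
-- def _word(n):
--     if n < 20:
--         return UNITS[n]
--     if n % 10 == 0:
--         return TENS[n // 10 - 2]
--     return TENS[n // 10 - 2] + ' ' + UNITS[n % 10]
--
--
-- WORDS = [_word(n) for n in range(100)]
--
--
-- def transformation(answer: int) -> str:
--     if answer < -100:
--         return 'Меньше минус ста'
--     if answer > 100:
--         return 'Больше ста'
--     if answer < 0:
--         return 'минус ' + WORDS[-answer]
--     return WORDS[answer]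
-- ===== Notes on version B (the rewrite author's own statement) =====
-- stated objective: simpler
-- what changed: Replaces A's nested branch/append logic with a table precomputed once mapping every integer in -99..99 to its word string; the function keeps only the two boundary guards and one lookup.
-- intended difference: For answer in -19..-11 A returns 'минус ' plus the units word (e.g. 'минус один' for -11) because its negative branch tests answer%10!=0 before the teens case; B returns the correct teen word ('минус одиннадцать'), which is the intended Russian numeral. — e.g. on transformation(-11): A returns "минус один", B returns "минус одиннадцать"
import Mathlib
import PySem

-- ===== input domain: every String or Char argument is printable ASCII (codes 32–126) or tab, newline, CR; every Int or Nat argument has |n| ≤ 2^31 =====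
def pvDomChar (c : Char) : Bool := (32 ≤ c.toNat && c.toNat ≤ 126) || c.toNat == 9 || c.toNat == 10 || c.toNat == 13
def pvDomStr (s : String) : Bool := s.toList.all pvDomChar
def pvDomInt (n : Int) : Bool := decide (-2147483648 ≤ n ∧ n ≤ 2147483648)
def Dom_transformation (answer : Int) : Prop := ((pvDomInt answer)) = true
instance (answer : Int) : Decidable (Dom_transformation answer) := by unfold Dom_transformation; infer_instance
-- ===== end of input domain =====

-- B replaces A's branch/append logic with a word table for 0..99 built once (objective: simpler);
-- on -19..-11 B returns the intended teen word where A drops it (see D_ below).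

-- ===== PORT A =====
-- the original dict word -> digit-string; A then inverts it with a comprehension
def dicPairsA : List (String × String) :=
  [("ноль", "0"), ("один", "1"), ("два", "2"), ("три", "3"), ("четыре", "4"),
   ("пять", "5"), ("шесть", "6"), ("семь", "7"), ("восемь", "8"), ("девять", "9"),
   ("десять", "10"), ("одиннадцать", "11"), ("двенадцать", "12"), ("тринадцать", "13"),
   ("четырнадцать", "14"), ("пятнадцать", "15"), ("шестнадцать", "16"),
   ("семнадцать", "17"), ("восемнадцать", "18"), ("девятнадцать", "19"),
   ("двадцать", "20"), ("тридцать", "30"), ("сорок", "40"), ("пятьдесят", "50"),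
   ("шестьдесят", "60"), ("семьдесят", "70"), ("восемьдесят", "80"),
   ("девяносто", "90"), ("минус", "-")]

-- dic = {v: k for k, v in dic.items()}
def dicA : PySem.Dict String String :=
  PySem.Dict.ofList (dicPairsA.map (fun p => (p.2, p.1)))

-- dic[str(n)]; the KeyError cases (n = 100) are excluded by Pre_, so the "" default is never used there
def dicLookA (n : Int) : String := dicA.getD (PySem.Int.toStr n) ""

-- Python mutates answer_append before the final joins; each ' '.join is written here with the
-- list contents that answer_append holds at that return (the conditional tens-append inlined).
def transformation (answer : Int) : String :=
  if answer < -100 then "Меньше минус ста"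
  else if answer > 100 then "Больше ста"
  else if answer > 19 then
    if PySem.Int.mod answer 10 = 0 then
      PySem.Str.join " " [dicLookA (PySem.Int.floordiv answer 10 * 10)]
    else
      PySem.Str.join " " [dicLookA (PySem.Int.floordiv answer 10 * 10),
                          dicLookA (PySem.Int.mod answer 10)]
  else if answer < 20 ∧ answer > 0 then PySem.Str.join " " [dicLookA answer]
  else if answer = 0 then "ноль"
  else if answer < 0 then
    -- here Python rebinds answer = -answer
    if -answer > 19 ∧ PySem.Int.mod (-answer) 10 = 0 then
      PySem.Str.join " " ["минус", dicLookA (PySem.Int.floordiv (-answer) 10 * 10)]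
    else if PySem.Int.mod (-answer) 10 ≠ 0 then
      (if -answer > 19 then
        PySem.Str.join " " ["минус", dicLookA (PySem.Int.floordiv (-answer) 10 * 10),
                            dicLookA (PySem.Int.mod (-answer) 10)]
      else PySem.Str.join " " ["минус", dicLookA (PySem.Int.mod (-answer) 10)])
    else if -answer < 20 then PySem.Str.join " " ["минус", dicLookA (-answer)]
    else ""  -- unreachable fall-through (Python would return None; no int reaches it)
  else ""    -- unreachable: every remaining int is covered above

-- ===== PORT B =====
def unitsB : List String :=
  ["ноль", "один", "два", "три", "четыре", "пять", "шесть", "семь", "восемь",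
   "девять", "десять", "одиннадцать", "двенадцать", "тринадцать", "четырнадцать",
   "пятнадцать", "шестнадцать", "семнадцать", "восемнадцать", "девятнадцать"]

def tensB : List String :=
  ["двадцать", "тридцать", "сорок", "пятьдесят", "шестьдесят", "семьдесят",
   "восемьдесят", "девяносто"]

-- _word(n); Python's '+' on strings is ported as PySem.Str.join "" [...]
def wordB (n : Int) : String :=
  if n < 20 then PySem.List.pyGetD unitsB n ""
  else if PySem.Int.mod n 10 = 0 then
    PySem.List.pyGetD tensB (PySem.Int.floordiv n 10 - 2) ""
  else
    PySem.Str.join "" [PySem.List.pyGetD tensB (PySem.Int.floordiv n 10 - 2) "", " ",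
                       PySem.List.pyGetD unitsB (PySem.Int.mod n 10) ""]

-- WORDS = [_word(n) for n in range(100)]
def wordsB : List String := (PySem.List.pyRange 0 100 1).map wordB

def transformation_alt (answer : Int) : String :=
  if answer < -100 then "Меньше минус ста"
  else if answer > 100 then "Больше ста"
  else if answer < 0 then
    PySem.Str.join "" ["минус ", PySem.List.pyGetD wordsB (-answer) ""]
  else PySem.List.pyGetD wordsB answer ""  -- IndexError at ±100 excluded by Pre_

-- ===== PRECONDITION & SPEC =====
-- Pre_ excludes answer = 100 and answer = -100, on which A raises KeyError (its dict has no key '100');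
-- B raises IndexError there too (its table stops at 99).
def Pre_transformation (answer : Int) : Prop := answer ≠ 100 ∧ answer ≠ -100
instance (answer : Int) : Decidable (Pre_transformation answer) := by unfold Pre_transformation; infer_instance
def pvWitness_transformation : Int := (42)

-- For answer in -19..-11 A returns 'минус ' plus the units word (e.g. 'минус один' for -11) because its
-- negative branch tests answer % 10 != 0 before the teens case; B returns the correct teen word
-- ('минус одиннадцать'), which is the intended Russian numeral.
def D_transformation (answer : Int) : Prop := -19 ≤ answer ∧ answer ≤ -11
instance (answer : Int) : Decidable (D_transformation answer) := by unfold D_transformation; infer_instance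
def Spec_transformation (answer : Int) (out : String) : Prop := ¬ D_transformation answer → out = transformation_alt answer
instance (answer : Int) (out : String) : Decidable (Spec_transformation answer out) := by unfold Spec_transformation; infer_instance
def pvDiffWitness_transformation : Int := (-11)
def pvDiffWitnessOut_transformation : String × String := ("минус один", "минус одиннадцать")

-- ===== CLAIM =====
def Claim_unchanged_transformation : Prop := ∀ (answer : Int), Dom_transformation answer → Pre_transformation answer → Spec_transformation answer (transformation answer)
def Claim_changed_transformation : Prop := Dom_transformation (pvDiffWitness_transformation) ∧ Pre_transformation (pvDiffWitness_transformation) ∧ D_transformation (pvDiffWitness_transformation) ∧ transformation (pvDiffWitness_transformation) = pvDiffWitnessOut_transformation.1 ∧ transformation_alt (pvDiffWitness_transformation) = pvDiffWitnessOut_transformation.2 ∧ pvDiffWitnessOut_transformation.1 ≠ pvDiffWitnessOut_transformation.2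
def Claim_exact_transformation : Prop := ∀ (answer : Int), Dom_transformation answer → Pre_transformation answer → D_transformation answer → transformation answer ≠ transformation_alt answer

-- ===== LEMMAS AND PROOFS =====

-- A's inverted dict evaluated once to a literal, so the lookup facts below are cheap to decide
def dicALit : PySem.Dict String String := PySem.Dict.mk (dicPairsA.map (fun p => (p.2, p.1)))

def dicLookL (n : Int) : String := dicALit.getD (PySem.Int.toStr n) ""

set_option maxRecDepth 8192 in
lemma dicA_eq : dicA = dicALit := by decide

lemma dicLookA_eq (n : Int) : dicLookA n = dicLookL n := by
  unfold dicLookA dicLookL; rw [dicA_eq]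

-- proof-side copy of A's port with the literal dict
def transformationL (answer : Int) : String :=
  if answer < -100 then "Меньше минус ста"
  else if answer > 100 then "Больше ста"
  else if answer > 19 then
    if PySem.Int.mod answer 10 = 0 then
      PySem.Str.join " " [dicLookL (PySem.Int.floordiv answer 10 * 10)]
    else
      PySem.Str.join " " [dicLookL (PySem.Int.floordiv answer 10 * 10),
                          dicLookL (PySem.Int.mod answer 10)]
  else if answer < 20 ∧ answer > 0 then PySem.Str.join " " [dicLookL answer]
  else if answer = 0 then "ноль"
  else if answer < 0 then
    if -answer > 19 ∧ PySem.Int.mod (-answer) 10 = 0 then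
      PySem.Str.join " " ["минус", dicLookL (PySem.Int.floordiv (-answer) 10 * 10)]
    else if PySem.Int.mod (-answer) 10 ≠ 0 then
      (if -answer > 19 then
        PySem.Str.join " " ["минус", dicLookL (PySem.Int.floordiv (-answer) 10 * 10),
                            dicLookL (PySem.Int.mod (-answer) 10)]
      else PySem.Str.join " " ["минус", dicLookL (PySem.Int.mod (-answer) 10)])
    else if -answer < 20 then PySem.Str.join " " ["минус", dicLookL (-answer)]
    else ""
  else ""

lemma transformation_eq (a : Int) : transformation a = transformationL a := by
  unfold transformation transformationL
  simp only [dicLookA_eq]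

-- the 8 tens lookups and the 19 unit lookups of A's dict, against B's tables
lemma tens_fin : ∀ t : Fin 8, dicLookL (((t : Int) + 2) * 10) = PySem.List.pyGetD tensB (t : Int) "" := by
  decide

lemma units_fin : ∀ u : Fin 19, dicLookL ((u : Int) + 1) = PySem.List.pyGetD unitsB ((u : Int) + 1) "" := by
  decide

lemma tens_look (q : Int) (h2 : 2 ≤ q) (h9 : q ≤ 9) :
    dicLookL (q * 10) = PySem.List.pyGetD tensB (q - 2) "" := by
  have hk : (q - 2).toNat < 8 := by omega
  have h := tens_fin ⟨(q - 2).toNat, hk⟩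
  have hc : ((⟨(q - 2).toNat, hk⟩ : Fin 8) : Int) = q - 2 := by
    simp only [Fin.val]; omega
  rw [hc] at h
  have : (q - 2 + 2) * 10 = q * 10 := by ring
  rw [this] at h
  exact h

lemma units_look (u : Int) (h1 : 1 ≤ u) (h19 : u ≤ 19) :
    dicLookL u = PySem.List.pyGetD unitsB u "" := by
  have hk : (u - 1).toNat < 19 := by omega
  have h := units_fin ⟨(u - 1).toNat, hk⟩
  have hc : ((⟨(u - 1).toNat, hk⟩ : Fin 19) : Int) = u - 1 := by
    simp only [Fin.val]; omega
  rw [hc] at h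
  have : u - 1 + 1 = u := by ring
  rw [this] at h
  exact h

-- B's table lookup is _word(n) for 0 ≤ n < 100
lemma words_look (n : Int) (h0 : 0 ≤ n) (h : n < 100) :
    PySem.List.pyGetD wordsB n "" = wordB n := by
  unfold wordsB
  exact PySem.List.pyGetD_map_pyRange_of_nonneg wordB 100 n "" h0 h

-- join shapes
lemma join1 (x : String) : PySem.Str.join " " [x] = x := by
  simp [PySem.Str.join, PySem.Chars.join, List.intercalate]

lemma join2 (x y : String) : PySem.Str.join " " [x, y] = PySem.Str.join "" [x, " ", y] := by
  simp [PySem.Str.join, PySem.Chars.join, List.intercalate, List.intersperse]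

lemma joinMinus (y : String) : PySem.Str.join " " ["минус", y] = PySem.Str.join "" ["минус ", y] := by
  simp [PySem.Str.join, PySem.Chars.join, List.intercalate, List.intersperse]

lemma joinMinus3 (y z : String) :
    PySem.Str.join " " ["минус", y, z] = PySem.Str.join "" ["минус ", PySem.Str.join " " [y, z]] := by
  simp [PySem.Str.join, PySem.Chars.join, List.intercalate, List.intersperse]

-- floordiv/mod facts for 0 < a
lemma q_bounds (a : Int) (h : 20 ≤ a) (h99 : a ≤ 99) :
    2 ≤ PySem.Int.floordiv a 10 ∧ PySem.Int.floordiv a 10 ≤ 9 := by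
  constructor
  · exact (PySem.Int.le_floordiv_iff_mul_le (by omega)).2 (by omega)
  · have := (PySem.Int.floordiv_lt_iff_lt_mul (q := 10) (a := a) (b := 10) (by omega)).2 (by omega)
    omega

lemma mod_bounds (a : Int) : 0 ≤ PySem.Int.mod a 10 ∧ PySem.Int.mod a 10 < 10 :=
  ⟨PySem.Int.mod_nonneg a (by omega), PySem.Int.mod_lt a (by omega)⟩

lemma mod_small (a : Int) (h0 : 0 ≤ a) (h : a < 10) : PySem.Int.mod a 10 = a := by
  rw [PySem.Int.mod_eq_emod_of_pos (b := 10) (by omega)]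
  omega

-- the tens region 20..99 of B's word table, as A computes it
lemma region_tens (a : Int) (h20 : 20 ≤ a) (h99 : a ≤ 99) :
    (if PySem.Int.mod a 10 = 0 then
      PySem.Str.join " " [dicLookL (PySem.Int.floordiv a 10 * 10)]
    else
      PySem.Str.join " " [dicLookL (PySem.Int.floordiv a 10 * 10),
                          dicLookL (PySem.Int.mod a 10)]) = wordB a := by
  obtain ⟨hq2, hq9⟩ := q_bounds a h20 h99
  obtain ⟨hm0, hm10⟩ := mod_bounds a
  have hT := tens_look (PySem.Int.floordiv a 10) hq2 hq9
  have hB : wordB a = if PySem.Int.mod a 10 = 0 then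
      PySem.List.pyGetD tensB (PySem.Int.floordiv a 10 - 2) ""
    else PySem.Str.join "" [PySem.List.pyGetD tensB (PySem.Int.floordiv a 10 - 2) "", " ",
                            PySem.List.pyGetD unitsB (PySem.Int.mod a 10) ""] := by
    unfold wordB
    rw [if_neg (by omega : ¬ a < 20)]
  rw [hB]
  by_cases hm : PySem.Int.mod a 10 = 0
  · rw [if_pos hm, if_pos hm, join1, hT]
  · have hU := units_look (PySem.Int.mod a 10) (by omega) (by omega)
    rw [if_neg hm, if_neg hm, join2, hT, hU]

lemma agree_of_in_range (a : Int) (h1 : -99 ≤ a) (h2 : a ≤ 99)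
    (hD : ¬ D_transformation a) : transformation a = transformation_alt a := by
  rw [transformation_eq]
  unfold transformationL transformation_alt D_transformation at *
  rw [if_neg (by omega : ¬ a < -100), if_neg (by omega : ¬ a > 100),
      if_neg (by omega : ¬ a < -100), if_neg (by omega : ¬ a > 100)]
  by_cases hpos20 : a > 19
  · -- 20 ≤ a ≤ 99
    rw [if_pos hpos20, if_neg (by omega : ¬ a < 0),
        words_look a (by omega) (by omega)]
    exact region_tens a (by omega) h2
  · rw [if_neg hpos20]
    by_cases hsm : a < 20 ∧ a > 0
    · -- 1 ≤ a ≤ 19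
      rw [if_pos hsm, if_neg (by omega : ¬ a < 0), words_look a (by omega) (by omega), join1,
          units_look a (by omega) (by omega)]
      unfold wordB
      rw [if_pos (by omega : a < 20)]
    · rw [if_neg hsm]
      by_cases h0 : a = 0
      · rw [if_pos h0, if_neg (by omega : ¬ a < 0), h0]
        decide
      · -- a < 0
        have hneg : a < 0 := by omega
        rw [if_neg h0, if_pos hneg, if_pos hneg, words_look (-a) (by omega) (by omega)]
        obtain ⟨hm0, hm10⟩ := mod_bounds (-a)
        by_cases hbig : -a > 19
        · -- -99 ≤ a ≤ -20
          have := region_tens (-a) (by omega) (by omega)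
          by_cases hm : PySem.Int.mod (-a) 10 = 0
          · rw [if_pos ⟨hbig, hm⟩, joinMinus, ← this, if_pos hm, join1]
          · rw [if_neg (by tauto), if_pos hm, if_pos hbig, joinMinus3, ← this, if_neg hm]
        · -- -10 ≤ a ≤ -1 (the teens -19..-11 are inside D_ and excluded here)
          have hle10 : -a ≤ 10 := by omega
          by_cases hm : PySem.Int.mod (-a) 10 = 0
          · -- -a = 10
            have h10 : -a = 10 := by
              rcases (by omega : -a = 10 ∨ -a < 10) with h | h
              · exact h
              · rw [mod_small (-a) (by omega) h] at hm; omega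
            rw [if_neg (by tauto), if_neg (not_not_intro hm), if_pos (by omega : -a < 20), h10, joinMinus,
                units_look 10 (by omega) (by omega)]
            unfold wordB
            rw [if_pos (by omega : (10:Int) < 20)]
          · -- 1 ≤ -a ≤ 9
            have hlt10 : -a < 10 := by
              rcases (by omega : -a = 10 ∨ -a < 10) with h | h
              · rw [h] at hm; exact absurd (by decide : PySem.Int.mod (10:Int) 10 = 0) hm
              · exact h
            have hms := mod_small (-a) (by omega) hlt10
            rw [if_neg (by tauto), if_pos hm, if_neg hbig, hms, joinMinus,
                units_look (-a) (by omega) (by omega)]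
            unfold wordB
            rw [if_pos (by omega : -a < 20)]

set_option maxRecDepth 8192 in
lemma changed_A : transformation (-11) = "минус один" := by
  rw [transformation_eq]; decide

set_option maxRecDepth 8192 in
lemma changed_B : transformation_alt (-11) = "минус одиннадцать" := by decide

set_option maxRecDepth 8192 in
lemma tight_fin : ∀ k : Fin 9,
    transformationL ((k : Int) - 19) ≠ transformation_alt ((k : Int) - 19) := by decide

-- ===== VERDICT =====
theorem transformation_spec : Claim_unchanged_transformation := by
  intro a _ hP
  unfold Spec_transformation
  intro hD
  by_cases hlo : a < -100
  · simp [transformation, transformation_alt, hlo]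
  · by_cases hhi : a > 100
    · simp [transformation, transformation_alt, hlo, hhi]
    · rcases hP with ⟨hp1, hp2⟩
      exact agree_of_in_range a (by omega) (by omega) hD

theorem transformation_changed : Claim_changed_transformation := by
  unfold Claim_changed_transformation
  refine ⟨by decide, by decide, by decide, changed_A, changed_B, by decide⟩

theorem transformation_tight : Claim_exact_transformation := by
  intro a _ _ hD
  unfold D_transformation at hD
  rw [transformation_eq]
  have hk : (a + 19).toNat < 9 := by omega
  have h := tight_fin ⟨(a + 19).toNat, hk⟩
  have hc : ((⟨(a + 19).toNat, hk⟩ : Fin 9) : Int) - 19 = a := by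
    simp only [Fin.val]; omega
  rw [hc] at h
  exact h
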